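-- pv_equiv track=rewrite | github.com/VladislavDDD/bh67gitt | lesson 7.py | odd_triangle_2
-- ===== SOURCE A (Python) =====
-- def odd_triangle_2(depth):
-- 	trinagle = []
-- 	number = 1
-- 	for i in range(depth):
-- 		line = []
-- 		for j in range(i+1):
-- 			line.append(number)
-- 			number += 2
-- 		trinagle.append(line)
-- 	return trinagle
-- ===== SOURCE B (Python) =====
-- def odd_triangle_2(depth):
--     return [[i * i + i + 1 + 2 * j for j in range(i + 1)] for i in range(depth)]
-- ===== Notes on version B (the rewrite author's own statement) =====
-- stated objective: simpler
-- what changed: Replaces the running counter threaded across rows with a closed-form formula (row i starts at i*i+i+1, element j adds 2*j), so each row is computed independently by a nested comprehension with no carried state.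
import Mathlib
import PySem

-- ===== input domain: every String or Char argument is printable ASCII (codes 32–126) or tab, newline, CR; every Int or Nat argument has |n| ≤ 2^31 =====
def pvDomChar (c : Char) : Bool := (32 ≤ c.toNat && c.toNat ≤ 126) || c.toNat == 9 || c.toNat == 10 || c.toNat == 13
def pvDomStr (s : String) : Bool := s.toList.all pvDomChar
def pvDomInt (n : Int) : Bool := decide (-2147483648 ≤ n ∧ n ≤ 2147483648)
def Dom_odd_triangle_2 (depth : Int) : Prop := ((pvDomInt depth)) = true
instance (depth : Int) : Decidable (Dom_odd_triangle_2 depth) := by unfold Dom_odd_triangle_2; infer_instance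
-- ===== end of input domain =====

-- B replaces the running counter carried across rows with the closed-form start i*i+i+1 per row (simpler: stateless nested comprehension).


-- ===== PORT A =====
-- literal port of A: fold over range(depth), state = (triangle so far, running number)
def odd_triangle_2 (depth : Int) : List (List Int) :=
  let st :=
    (PySem.List.pyRange 0 depth 1).foldl
      (fun (st : List (List Int) × Int) i =>
        let ln :=
          (PySem.List.pyRange 0 (i + 1) 1).foldl
            (fun (ln : List Int × Int) _ => (ln.1 ++ [ln.2], ln.2 + 2))
            ([], st.2)
        (st.1 ++ [ln.1], ln.2))
      ([], 1)
  st.1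

-- ===== PORT B =====
-- literal port of B: stateless nested comprehension with closed-form entries
def odd_triangle_2_alt (depth : Int) : List (List Int) :=
  (PySem.List.pyRange 0 depth 1).map (fun i =>
    (PySem.List.pyRange 0 (i + 1) 1).map (fun j => i * i + i + 1 + 2 * j))

-- ===== PRECONDITION & SPEC =====
def Spec_odd_triangle_2 (depth : Int) (out : List (List Int)) : Prop := out = odd_triangle_2_alt depth
instance (depth : Int) (out : List (List Int)) : Decidable (Spec_odd_triangle_2 depth out) := by unfold Spec_odd_triangle_2; infer_instance

-- ===== CLAIM (what is proved, stated in full; the proofs are below) =====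
def Claim_equal_odd_triangle_2 : Prop := ∀ (depth : Int), Dom_odd_triangle_2 depth → Spec_odd_triangle_2 depth (odd_triangle_2 depth)

-- ===== LEMMAS AND PROOFS =====

-- the inner loop appends s, s+2, …, s+2n-2 and ends with counter s+2n
lemma inner_loop (n : Nat) (acc : List Int) (s : Int) :
    (PySem.List.pyRange 0 (n : Int) 1).foldl
      (fun (ln : List Int × Int) _ => (ln.1 ++ [ln.2], ln.2 + 2)) (acc, s)
    = (acc ++ (List.range n).map (fun j => s + 2 * j), s + 2 * n) := by
  induction n generalizing acc s with
  | zero => simp [PySem.List.pyRange_one_eq_nil]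
  | succ n ih =>
    have h : ((n + 1 : Nat) : Int) = (n : Int) + 1 := by push_cast; ring
    rw [h, PySem.List.pyRange_one_succ_right (by positivity), List.foldl_append, ih]
    simp [List.range_succ]
    ring

-- one row of B, as a List.range map
def rowB (i : Nat) : List Int :=
  (List.range (i + 1)).map (fun j => (i : Int) * i + i + 1 + 2 * j)

-- the outer loop: after n rows the triangle is the first n rows of B and the counter is n*n+n+1
lemma outer_loop (n : Nat) :
    (PySem.List.pyRange 0 (n : Int) 1).foldl
      (fun (st : List (List Int) × Int) i =>
        let ln :=
          (PySem.List.pyRange 0 (i + 1) 1).foldl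
            (fun (ln : List Int × Int) _ => (ln.1 ++ [ln.2], ln.2 + 2))
            ([], st.2)
        (st.1 ++ [ln.1], ln.2))
      ([], 1)
    = ((List.range n).map rowB, (n : Int) * n + n + 1) := by
  induction n with
  | zero => simp [PySem.List.pyRange_one_eq_nil]
  | succ n ih =>
    have h : ((n + 1 : Nat) : Int) = (n : Int) + 1 := by push_cast; ring
    rw [h, PySem.List.pyRange_one_succ_right (by positivity), List.foldl_append, ih]
    have hcast : ((n : Int) + 1) = ((n + 1 : Nat) : Int) := by push_cast; ring
    simp only [List.foldl_cons, List.foldl_nil]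
    rw [hcast, inner_loop (n + 1) [] ((n : Int) * n + n + 1)]
    refine Prod.ext ?_ ?_
    · simp [List.range_succ, rowB]
    · push_cast; ring

lemma alt_eq (n : Nat) : odd_triangle_2_alt (n : Int) = (List.range n).map rowB := by
  unfold odd_triangle_2_alt rowB
  rw [PySem.List.pyRange_one]
  simp only [sub_zero, Int.toNat_natCast, List.map_map]
  refine List.map_congr_left fun k _ => ?_
  simp only [Function.comp, zero_add]
  have : ((k : Int) + 1) = ((k + 1 : Nat) : Int) := by push_cast; ring
  rw [this, PySem.List.pyRange_one]
  simp [List.pure_def, List.bind_eq_flatMap, ← List.map_eq_flatMap, List.map_map, Function.comp_def]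

-- ===== VERDICT (by name: the statement is the Claim_ definition above) =====
theorem odd_triangle_2_spec : Claim_equal_odd_triangle_2 := by
  intro depth _
  unfold Spec_odd_triangle_2 odd_triangle_2
  by_cases hd : depth ≤ 0
  · simp [PySem.List.pyRange_one_eq_nil hd, odd_triangle_2_alt]
  · have h : depth = ((depth.toNat : Nat) : Int) := by omega
    rw [h, outer_loop, alt_eq]
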